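-- pv_equiv track=rewrite | github.com/nthbao13/IS252.P21-Data-Mining | algorithm/association_rules.py | find_maximal_frequent_itemset
-- ===== SOURCE A (Python) =====
-- def find_maximal_frequent_itemset(frequent_itemsets):
--     """Tìm tập hợp thường xuyên tối đại"""
--     if not frequent_itemsets:
--         return []
--
--     # Sắp xếp theo kích thước giảm dần để tối ưu
--     sorted_items = sorted(frequent_itemsets, key=lambda x: len(x[0]), reverse=True)
--     maximal_itemsets = []
--     seen = set()
--
--     for itemset, _ in sorted_items:
--         itemset = frozenset(itemset)
--         if not any(itemset.issubset(maximal) for maximal in maximal_itemsets):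
--             maximal_itemsets.append(itemset)
--             seen.add(itemset)
--
--     return maximal_itemsets
-- ===== SOURCE B (Python) =====
-- def find_maximal_frequent_itemset(frequent_itemsets):
--     """Maximal frequent itemsets via an inverted index item -> indices of kept
--     maximal sets; a candidate is covered iff the intersection of its items'
--     posting lists is non-empty, replacing A's rescan of all kept maximals."""
--     if not frequent_itemsets:
--         return []
--     order = sorted(frequent_itemsets, key=lambda x: len(x[0]), reverse=True)
--     maximal = []
--     postings = {}
--     for itemset, _ in order:
--         items = list(dict.fromkeys(itemset))
--         if items:
--             cover = postings.get(items[0], [])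
--             for x in items[1:]:
--                 cover = [i for i in cover if i in postings.get(x, [])]
--             covered = bool(cover)
--         else:
--             covered = bool(maximal)
--         if not covered:
--             idx = len(maximal)
--             for x in items:
--                 postings[x] = postings.get(x, []) + [idx]
--             maximal.append(frozenset(items))
--     return maximal
-- ===== Notes on version B (the rewrite author's own statement) =====
-- stated objective: alternative
-- what changed: B replaces A's inner scan of all kept maximal sets (any(itemset.issubset(m) for m in maximal)) by an inverted index mapping each item to the posting list of kept maximal sets containing it; a candidate is covered iff the intersection of its items' posting lists is non-empty.
import Mathlib
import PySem

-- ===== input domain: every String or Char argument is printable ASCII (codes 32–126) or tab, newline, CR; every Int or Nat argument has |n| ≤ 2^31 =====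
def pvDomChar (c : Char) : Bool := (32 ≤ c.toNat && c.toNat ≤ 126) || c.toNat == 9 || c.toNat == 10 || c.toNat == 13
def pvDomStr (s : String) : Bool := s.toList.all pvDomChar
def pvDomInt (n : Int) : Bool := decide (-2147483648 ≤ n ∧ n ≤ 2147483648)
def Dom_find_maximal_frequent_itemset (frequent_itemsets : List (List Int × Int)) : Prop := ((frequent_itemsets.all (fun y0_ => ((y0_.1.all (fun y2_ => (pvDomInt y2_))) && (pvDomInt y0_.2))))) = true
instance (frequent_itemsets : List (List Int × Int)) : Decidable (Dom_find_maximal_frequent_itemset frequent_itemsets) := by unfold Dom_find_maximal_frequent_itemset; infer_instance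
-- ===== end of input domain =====

-- B replaces A's inner rescan of all kept maximal sets by an inverted index
-- (item -> posting list of kept-maximal indices, intersected); objective: alternative.
-- The returned frozensets are PySem.Sets (List Int of distinct elements).

-- ===== PORT A =====
-- loop body of A: state = (maximal_itemsets, seen); seen is write-only in A
def pvStepA (st : List (List Int) × PySem.Set (List Int)) (p : List Int × Int) :
    List (List Int) × PySem.Set (List Int) :=
  let s := PySem.Set.ofList p.1          -- itemset = frozenset(itemset)
  if st.1.any (fun m => PySem.Set.issubset s m) then st
  else (st.1 ++ [s], PySem.Set.add st.2 s)

def find_maximal_frequent_itemset (frequent_itemsets : List (List Int × Int)) : List (List Int) :=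
  if frequent_itemsets.isEmpty then [] else
  let sorted_items := PySem.List.sorted frequent_itemsets (fun x => (x.1.length : Int)) true
  (sorted_items.foldl pvStepA ([], PySem.Set.empty)).1

-- ===== PORT B =====
-- loop body of B: state = (maximal, postings); covered via posting-list intersection
def pvStepB (st : List (List Int) × PySem.Dict Int (List Int)) (p : List Int × Int) :
    List (List Int) × PySem.Dict Int (List Int) :=
  let items := PySem.List.dedup p.1      -- list(dict.fromkeys(itemset))
  let covered : Bool :=
    match items with
    | [] => !st.1.isEmpty
    | x0 :: rest =>
      !(rest.foldl (fun c x => c.filter (fun i => (st.2.getD x []).contains i))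
          (st.2.getD x0 [])).isEmpty
  if covered then st
  else (st.1 ++ [PySem.Set.ofList items],
        items.foldl (fun d x => d.insert x (d.getD x [] ++ [(st.1.length : Int)])) st.2)

def find_maximal_frequent_itemset_alt (frequent_itemsets : List (List Int × Int)) : List (List Int) :=
  if frequent_itemsets.isEmpty then [] else
  let order := PySem.List.sorted frequent_itemsets (fun x => (x.1.length : Int)) true
  (order.foldl pvStepB ([], PySem.Dict.empty)).1

-- ===== PRECONDITION & SPEC =====
def Spec_find_maximal_frequent_itemset (frequent_itemsets : List (List Int × Int)) (out : List (List Int)) : Prop := out = find_maximal_frequent_itemset_alt frequent_itemsets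
instance (frequent_itemsets : List (List Int × Int)) (out : List (List Int)) : Decidable (Spec_find_maximal_frequent_itemset frequent_itemsets out) := by unfold Spec_find_maximal_frequent_itemset; infer_instance

-- ===== CLAIM (what is proved, stated in full; the proofs are below) =====
def Claim_equal_find_maximal_frequent_itemset : Prop := ∀ (frequent_itemsets : List (List Int × Int)), Dom_find_maximal_frequent_itemset frequent_itemsets → Spec_find_maximal_frequent_itemset frequent_itemsets (find_maximal_frequent_itemset frequent_itemsets)

-- ===== LEMMAS AND PROOFS =====

-- the posting list B's index keeps for item x, expressed from the maximal list
def postList (mA : List (List Int)) (x : Int) : List Int :=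
  (List.range mA.length).filterMap
    (fun j => if x ∈ mA.getD j [] then some ((j : Nat) : Int) else none)

lemma mem_postList (mA : List (List Int)) (x i : Int) :
    i ∈ postList mA x ↔ ∃ j, j < mA.length ∧ i = (j : Int) ∧ x ∈ mA.getD j [] := by
  simp only [postList, List.mem_filterMap, List.mem_range]
  constructor
  · rintro ⟨j, hj, h⟩
    split at h
    · exact ⟨j, hj, by simpa using h.symm, by assumption⟩
    · simp at h
  · rintro ⟨j, hj, rfl, hx⟩
    refine ⟨j, hj, ?_⟩
    simp only [List.getD] at hx ⊢
    simp [hx]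

lemma postList_append (mA : List (List Int)) (s : List Int) (x : Int) :
    postList (mA ++ [s]) x =
      postList mA x ++ (if x ∈ s then [((mA.length : Nat) : Int)] else []) := by
  unfold postList
  rw [List.length_append, List.length_singleton, List.range_succ, List.filterMap_append]
  congr 1
  · apply List.filterMap_congr
    intro j hj
    rw [List.mem_range] at hj
    rw [List.getD_append _ _ _ _ hj]
  · have hs : (mA ++ [s])[mA.length]?.getD ([] : List Int) = s := by
      rw [List.getElem?_append_right le_rfl]
      simp
    simp only [List.filterMap_cons, List.filterMap_nil, List.getD, hs]
    by_cases hx : x ∈ s <;> simp [hx]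

lemma filter_foldl (pred : Int → Int → Bool) (rest : List Int) (c0 : List Int) :
    rest.foldl (fun c x => c.filter (pred x)) c0
      = c0.filter (fun i => rest.all (fun x => pred x i)) := by
  induction rest generalizing c0 with
  | nil => simp
  | cons y ys ih =>
    simp only [List.foldl_cons, ih, List.filter_filter, List.all_cons]
    congr 1
    funext i
    rw [Bool.and_comm]

lemma exists_mem_iff_getD (mA : List (List Int)) (P : List Int → Prop) :
    (∃ m ∈ mA, P m) ↔ ∃ j, j < mA.length ∧ P (mA.getD j []) := by
  constructor
  · rintro ⟨m, hm, hp⟩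
    obtain ⟨j, hj, rfl⟩ := List.mem_iff_getElem.1 hm
    exact ⟨j, hj, by rwa [List.getD_eq_getElem _ _ hj]⟩
  · rintro ⟨j, hj, hp⟩
    exact ⟨mA.getD j [], by rw [List.getD_eq_getElem _ _ hj]; exact List.getElem_mem hj, hp⟩

-- the covered test of B agrees with A's subset scan, under the index invariant
lemma covered_eq (mA : List (List Int)) (d : PySem.Dict Int (List Int)) (xs : List Int)
    (hinv : ∀ x, d.getD x [] = postList mA x) :
    (match PySem.List.dedup xs with
     | [] => !mA.isEmpty
     | x0 :: rest =>
       !(rest.foldl (fun c x => c.filter (fun i => (d.getD x []).contains i))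
           (d.getD x0 [])).isEmpty)
      = mA.any (fun m => PySem.Set.issubset (PySem.Set.ofList xs) m) := by
  rw [Bool.eq_iff_iff]
  have hsub : (mA.any (fun m => PySem.Set.issubset (PySem.Set.ofList xs) m) = true)
      ↔ ∃ m ∈ mA, ∀ y ∈ xs, y ∈ m := by
    simp only [List.any_eq_true, PySem.Set.issubset_iff, PySem.Set.mem_ofList]
  cases hd : PySem.List.dedup xs with
  | nil =>
    have hxs : xs = [] := by
      by_contra h
      rcases List.exists_mem_of_ne_nil xs h with ⟨a, ha⟩
      have h2 : a ∈ PySem.List.dedup xs := (PySem.List.mem_dedup xs a).2 ha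
      rw [hd] at h2
      simp at h2
    subst hxs
    simp only [hsub]
    constructor
    · intro h
      rcases List.exists_mem_of_ne_nil mA (by simpa using h) with ⟨m, hm⟩
      exact ⟨m, hm, by simp⟩
    · rintro ⟨m, hm, -⟩
      simp only [Bool.not_eq_true', List.isEmpty_eq_false_iff_exists_mem]
      exact ⟨m, hm⟩
  | cons x0 rest =>
    have hmemxs : ∀ y, y ∈ xs ↔ y ∈ x0 :: rest := by
      intro y; rw [← hd]; exact (PySem.List.mem_dedup xs y).symm
    dsimp only
    rw [filter_foldl]
    simp only [hinv, Bool.not_eq_true', List.isEmpty_eq_false_iff_exists_mem]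
    constructor
    · intro h
      obtain ⟨i, hi⟩ := h
      rw [List.mem_filter, mem_postList] at hi
      obtain ⟨⟨j, hj, rfl, hx0⟩, hall⟩ := hi
      rw [hsub, exists_mem_iff_getD]
      refine ⟨j, hj, ?_⟩
      intro y hy
      rw [hmemxs] at hy
      rcases List.mem_cons.1 hy with rfl | hy
      · exact hx0
      · have := (List.all_eq_true.1 hall) y hy
        simp only [List.contains_iff_mem] at this
        rw [mem_postList] at this
        obtain ⟨j', hj', hji, hmem⟩ := this
        have : j' = j := by exact_mod_cast hji.symm
        subst this; exact hmem
    · intro h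
      rw [hsub, exists_mem_iff_getD] at h
      obtain ⟨j, hj, hall⟩ := h
      refine ⟨(j : Int), ?_⟩
      rw [List.mem_filter, mem_postList]
      refine ⟨⟨j, hj, rfl, hall x0 ((hmemxs x0).2 (by simp))⟩, ?_⟩
      rw [List.all_eq_true]
      intro y hy
      simp only [List.contains_iff_mem, mem_postList]
      exact ⟨j, hj, rfl, hall y ((hmemxs y).2 (by simp [hy]))⟩

lemma postings_foldl (items : List Int) (hnd : items.Nodup) (idx : Int)
    (d : PySem.Dict Int (List Int)) (x : Int) :
    (items.foldl (fun d x => d.insert x (d.getD x [] ++ [idx])) d).getD x []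
      = d.getD x [] ++ (if x ∈ items then [idx] else []) := by
  induction items generalizing d with
  | nil => simp
  | cons y ys ih =>
    obtain ⟨hy, hnd'⟩ := List.nodup_cons.1 hnd
    rw [List.foldl_cons, ih hnd']
    rw [PySem.Dict.getD_insert]
    by_cases hxy : x = y
    · subst hxy
      simp [hy]
    · simp [hxy, List.mem_cons]

-- main loop invariant: same maximal list, index = postList of it
lemma loop_eq (l : List (List Int × Int)) :
    ∀ (mA : List (List Int)) (seen : PySem.Set (List Int)) (d : PySem.Dict Int (List Int)),
      (∀ x, d.getD x [] = postList mA x) →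
      (l.foldl pvStepA (mA, seen)).1 = (l.foldl pvStepB (mA, d)).1 := by
  induction l with
  | nil => intro mA seen d _; rfl
  | cons p l ih =>
    intro mA seen d hinv
    rw [List.foldl_cons, List.foldl_cons]
    have hcov := covered_eq mA d p.1 hinv
    show (l.foldl pvStepA (pvStepA (mA, seen) p)).1 = (l.foldl pvStepB (pvStepB (mA, d) p)).1
    unfold pvStepA pvStepB
    simp only [hcov]
    by_cases hc : mA.any (fun m => PySem.Set.issubset (PySem.Set.ofList p.1) m) = true
    · simp only [hc, if_true]
      exact ih mA seen d hinv
    · rw [Bool.not_eq_true] at hc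
      simp only [hc, Bool.false_eq_true, if_false]
      have hset : PySem.Set.ofList (PySem.List.dedup p.1) = PySem.Set.ofList p.1 := by
        rw [PySem.List.dedup_eq_ofList, PySem.Set.ofList_ofList]
      rw [hset]
      apply ih
      intro x
      rw [postings_foldl _ (by rw [PySem.List.dedup_eq_ofList]; exact PySem.Set.nodup_ofList _) _ d x,
          hinv, postList_append]
      simp [PySem.List.dedup_eq_ofList]

-- ===== VERDICT (by name: the statement is the Claim_ definition above) =====
theorem find_maximal_frequent_itemset_spec : Claim_equal_find_maximal_frequent_itemset := by
  intro fi _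
  unfold Spec_find_maximal_frequent_itemset find_maximal_frequent_itemset find_maximal_frequent_itemset_alt
  by_cases h : fi.isEmpty
  · simp [h]
  · rw [Bool.not_eq_true] at h
    simp only [h, Bool.false_eq_true, if_false]
    exact loop_eq _ [] PySem.Set.empty PySem.Dict.empty (by intro x; simp [postList])
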